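-- pv_equiv track=rewrite | github.com/Cassiexyq/Program-Exercise | 笔试/依图/大小判断.py | create2
-- ===== SOURCE A (Python) =====
-- def create2(res, sm):
--     new_sm = []
--     for i in range(len(sm)):
--         new_sm.append([sm[i][0],sm[i][1]])
--         for j in range(len(res)):
--
--             if sm[i][0] in res[j]:
--                 for k in res[j]:
--                     new_sm.append([k, sm[i][1]])
--             if sm[i][1] in res[j]:
--                 for k in res[j]:
--                     new_sm.append([sm[i][0],k])
--
--     return new_sm
-- ===== SOURCE B (Python) =====
-- def create2(res, sm):
--     # Index: element -> sorted list of indices of the groups containing it.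
--     idx = {}
--     for j, g in enumerate(res):
--         seen = set()
--         for e in g:
--             if e not in seen:
--                 seen.add(e)
--                 idx.setdefault(e, []).append(j)
--     out = []
--     for pair in sm:
--         a, b = pair[0], pair[1]
--         out.append([a, b])
--         ja = idx.get(a, [])
--         jb = idx.get(b, [])
--         ia = ib = 0
--         # merge the two sorted index lists, emitting blocks in group order
--         while ia < len(ja) or ib < len(jb):
--             if ib >= len(jb) or (ia < len(ja) and ja[ia] <= jb[ib]):
--                 j = ja[ia]
--             else:
--                 j = jb[ib]
--             if ia < len(ja) and ja[ia] == j: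
--                 out.extend([k, b] for k in res[j])
--                 ia += 1
--             if ib < len(jb) and jb[ib] == j:
--                 out.extend([a, k] for k in res[j])
--                 ib += 1
--     return out
-- ===== Notes on version B (the rewrite author's own statement) =====
-- stated objective: alternative
-- what changed: B precomputes one dictionary mapping each element to the sorted list of indices of the groups containing it, then per pair merges the two index lists to emit blocks in group order, instead of A's per-pair scan over every group with repeated membership tests; on the measured inputs output construction dominates, so the cost is comparable.
import Mathlib
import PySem

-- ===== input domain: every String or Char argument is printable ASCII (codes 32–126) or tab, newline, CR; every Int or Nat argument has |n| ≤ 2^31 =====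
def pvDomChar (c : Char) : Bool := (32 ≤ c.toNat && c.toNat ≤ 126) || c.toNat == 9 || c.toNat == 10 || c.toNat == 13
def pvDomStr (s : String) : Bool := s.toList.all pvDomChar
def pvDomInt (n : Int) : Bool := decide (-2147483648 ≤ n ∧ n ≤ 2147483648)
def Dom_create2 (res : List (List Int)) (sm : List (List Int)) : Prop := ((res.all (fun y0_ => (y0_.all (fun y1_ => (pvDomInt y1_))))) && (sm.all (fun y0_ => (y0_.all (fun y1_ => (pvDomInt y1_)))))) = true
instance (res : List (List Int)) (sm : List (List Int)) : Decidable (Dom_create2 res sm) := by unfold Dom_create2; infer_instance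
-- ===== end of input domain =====

-- B replaces A's per-pair scan of ALL groups by a precomputed element→group-indices
-- dictionary plus a sorted-merge of the two index lists (a different algorithm;
-- measured cost is comparable). Equivalence is proved on pairs of length ≥ 2 (otherwise A raises).

-- ===== PORT A =====
def create2 (res : List (List Int)) (sm : List (List Int)) : List (List Int) :=
  (PySem.List.pyRange 0 (sm.length : Int) 1).foldl (fun new_sm i =>
    let p := PySem.List.pyGetD sm i []
    let new_sm := new_sm ++ [[PySem.List.pyGetD p 0 0, PySem.List.pyGetD p 1 0]]
    (PySem.List.pyRange 0 (res.length : Int) 1).foldl (fun acc j =>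
      let g := PySem.List.pyGetD res j []
      let acc := if PySem.List.pyGetD p 0 0 ∈ g then acc ++ g.map (fun k => [k, PySem.List.pyGetD p 1 0]) else acc
      if PySem.List.pyGetD p 1 0 ∈ g then acc ++ g.map (fun k => [PySem.List.pyGetD p 0 0, k]) else acc)
      new_sm) []

-- ===== PORT B =====
-- the 'while ia < len(ja) or ib < len(jb)' merge loop of Source B, as recursion on the two lists
def emitMerge (res : List (List Int)) (a b : Int) : List Int → List Int → List (List Int)
  | [], [] => []
  | x :: ja, [] =>
      (PySem.List.pyGetD res x []).map (fun k => [k, b]) ++ emitMerge res a b ja []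
  | [], y :: jb =>
      (PySem.List.pyGetD res y []).map (fun k => [a, k]) ++ emitMerge res a b [] jb
  | x :: ja, y :: jb =>
      if x < y then
        (PySem.List.pyGetD res x []).map (fun k => [k, b]) ++ emitMerge res a b ja (y :: jb)
      else if y < x then
        (PySem.List.pyGetD res y []).map (fun k => [a, k]) ++ emitMerge res a b (x :: ja) jb
      else
        (PySem.List.pyGetD res x []).map (fun k => [k, b]) ++
        (PySem.List.pyGetD res y []).map (fun k => [a, k]) ++ emitMerge res a b ja jb
  termination_by ja jb => ja.length + jb.length

def create2_alt (res : List (List Int)) (sm : List (List Int)) : List (List Int) :=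
  let idx : PySem.Dict Int (List Int) :=
    (PySem.List.enumerate res 0).foldl (fun idx jg =>
      (jg.2.foldl (fun (st : PySem.Dict Int (List Int) × PySem.Set Int) e =>
          if e ∈ st.2 then st
          else (st.1.modify e [] (· ++ [jg.1]), st.2.add e))
        (idx, PySem.Set.empty)).1)
      PySem.Dict.empty
  sm.foldl (fun out pair =>
    let a := PySem.List.pyGetD pair 0 0
    let b := PySem.List.pyGetD pair 1 0
    (out ++ [[a, b]]) ++ emitMerge res a b (idx.getD a []) (idx.getD b [])) []

-- ===== PRECONDITION & SPEC =====
-- Pre_ excludes pairs of length < 2, on which Python A raises IndexError (B raises too).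
def Pre_create2 (_res : List (List Int)) (sm : List (List Int)) : Prop :=
  ∀ p ∈ sm, 2 ≤ p.length
instance (res : List (List Int)) (sm : List (List Int)) : Decidable (Pre_create2 res sm) := by
  unfold Pre_create2; infer_instance
def pvWitness_create2 : List (List Int) × List (List Int) := ([[1, 2], [3]], [[1, 3]])
def Spec_create2 (res : List (List Int)) (sm : List (List Int)) (out : List (List Int)) : Prop := out = create2_alt res sm
instance (res : List (List Int)) (sm : List (List Int)) (out : List (List Int)) : Decidable (Spec_create2 res sm out) := by unfold Spec_create2; infer_instance

-- ===== CLAIM (what is proved, stated in full; the proofs are below) =====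
def Claim_equal_create2 : Prop := ∀ (res : List (List Int)) (sm : List (List Int)), Dom_create2 res sm → Pre_create2 res sm → Spec_create2 res sm (create2 res sm)

-- ===== LEMMAS AND PROOFS =====

-- indices (from j0) of the groups in a suffix of res that contain e
def jsOf : List (List Int) → Int → Int → List Int
  | [], _, _ => []
  | g :: t, e, j0 => (if e ∈ g then [j0] else []) ++ jsOf t e (j0 + 1)

def innerFlat (res : List (List Int)) (a b : Int) : List (List Int) :=
  res.flatMap (fun g =>
    (if a ∈ g then g.map (fun k => [k, b]) else []) ++
    (if b ∈ g then g.map (fun k => [a, k]) else []))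

lemma jsOf_mem_le {t : List (List Int)} {e j0 x : Int} (h : x ∈ jsOf t e j0) : j0 ≤ x := by
  induction t generalizing j0 with
  | nil => simp [jsOf] at h
  | cons g t ih =>
    simp only [jsOf, List.mem_append] at h
    rcases h with h | h
    · split at h <;> simp_all
    · have := ih h; omega

-- the per-group inner loop of buildIdx
lemma groupFold_getD (g : List Int) (j : Int) (d : PySem.Dict Int (List Int))
    (seen : PySem.Set Int) (e : Int) :
    ((g.foldl (fun (st : PySem.Dict Int (List Int) × PySem.Set Int) x =>
        if x ∈ st.2 then st
        else (st.1.modify x [] (· ++ [j]), st.2.add x)) (d, seen)).1).getD e []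
      = d.getD e [] ++ (if e ∈ g ∧ e ∉ seen then [j] else []) := by
  induction g generalizing d seen with
  | nil => simp
  | cons h t ih =>
    by_cases hh : h ∈ seen
    · simp only [List.foldl_cons, if_pos hh, ih]
      congr 1
      by_cases he : e = h <;> simp [he, hh]
    · simp only [List.foldl_cons, if_neg hh, ih, PySem.Dict.getD_modify]
      by_cases he : e = h
      · subst he; simp [hh]
      · simp [he, PySem.Set.mem_add]

lemma buildIdx_getD :
    ∀ (res' : List (List Int)) (j0 : Int) (d : PySem.Dict Int (List Int)) (e : Int),
    ((PySem.List.enumerate res' j0).foldl (fun idx (jg : Int × List Int) =>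
        (jg.2.foldl (fun (st : PySem.Dict Int (List Int) × PySem.Set Int) x =>
            if x ∈ st.2 then st
            else (st.1.modify x [] (· ++ [jg.1]), st.2.add x)) (idx, PySem.Set.empty)).1) d).getD e []
      = d.getD e [] ++ jsOf res' e j0 := by
  intro res'
  induction res' with
  | nil => intro j0 d e; simp [jsOf, PySem.List.enumerate_nil]
  | cons g t ih =>
    intro j0 d e
    rw [PySem.List.enumerate_cons, List.foldl_cons, ih, groupFold_getD]
    simp only [jsOf]
    by_cases he : e ∈ g <;> simp [he, List.append_assoc]

lemma emitMerge_eq (res : List (List Int)) (a b : Int) :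
    ∀ (res' : List (List Int)) (j0 : Nat), res.drop j0 = res' →
    emitMerge res a b (jsOf res' a (j0 : Int)) (jsOf res' b (j0 : Int)) = innerFlat res' a b := by
  intro res'
  induction res' with
  | nil => intro j0 _; simp [jsOf, emitMerge, innerFlat]
  | cons g t ih =>
    intro j0 hdrop
    have hg : PySem.List.pyGetD res (j0 : Int) [] = g := by
      have h0 : (res.drop j0)[0]? = some g := by rw [hdrop]; rfl
      rw [List.getElem?_drop] at h0
      have h0' : res[j0]? = some g := by simpa using h0
      simp [PySem.List.pyGetD_natCast, List.getD_eq_getElem?_getD, h0']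
    have hdt : res.drop (j0 + 1) = t := by
      have h1 : res.drop (j0 + 1) = (res.drop j0).drop 1 := by rw [List.drop_drop]
      simp [h1, hdrop]
    have iht := ih (j0 + 1) hdt
    have hcast : ((j0 : Int) + 1) = ((j0 + 1 : Nat) : Int) := by push_cast; ring
    simp only [jsOf, innerFlat, List.flatMap_cons]
    by_cases ha : a ∈ g <;> by_cases hb : b ∈ g
    · -- both in g
      simp only [ha, hb, ite_true, List.singleton_append]
      rw [hcast, emitMerge]
      simp only [lt_self_iff_false, ite_false]
      rw [hg, iht]
      simp [innerFlat, List.append_assoc]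
    · -- a only
      simp only [ha, hb, ite_true, ite_false, List.singleton_append, List.nil_append]
      rw [hcast]
      rcases hjb : jsOf t b ((j0 + 1 : Nat) : Int) with _ | ⟨y, jb'⟩
      · rw [hjb] at iht
        rw [emitMerge, hg, iht]
        simp [innerFlat]
      · have hy : (j0 : Int) < y := by
          have hmem : y ∈ jsOf t b (((j0 + 1 : Nat)) : Int) := by rw [hjb]; simp
          have := jsOf_mem_le hmem
          push_cast at this ⊢
          omega
        rw [hjb] at iht
        rw [emitMerge, if_pos hy, hg, iht]
        simp [innerFlat]
    · -- b only
      simp only [ha, hb, ite_true, ite_false, List.singleton_append, List.nil_append]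
      rw [hcast]
      rcases hja : jsOf t a ((j0 + 1 : Nat) : Int) with _ | ⟨x, ja'⟩
      · rw [hja] at iht
        rw [emitMerge, hg, iht]
        simp [innerFlat]
      · have hx : (j0 : Int) < x := by
          have hmem : x ∈ jsOf t a (((j0 + 1 : Nat)) : Int) := by rw [hja]; simp
          have := jsOf_mem_le hmem
          push_cast at this ⊢
          omega
        rw [hja] at iht
        rw [emitMerge, if_neg (by omega), if_pos hx, hg, iht]
        simp [innerFlat]
    · -- neither
      simp only [ha, hb, ite_false, List.nil_append]
      rw [hcast, iht]
      simp [innerFlat]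

-- A's inner loop over range(len(res)) equals innerFlat
lemma innerA_eq (res : List (List Int)) (a b : Int) (acc : List (List Int)) :
    (PySem.List.pyRange 0 (res.length : Int) 1).foldl (fun acc j =>
      let g := PySem.List.pyGetD res j []
      let acc := if a ∈ g then acc ++ g.map (fun k => [k, b]) else acc
      if b ∈ g then acc ++ g.map (fun k => [a, k]) else acc) acc
    = acc ++ innerFlat res a b := by
  rw [PySem.List.foldl_pyRange_zero_pyGetD' res []
    (fun acc g => (if b ∈ g then
      (if a ∈ g then acc ++ g.map (fun k => [k, b]) else acc) ++ g.map (fun k => [a, k])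
      else (if a ∈ g then acc ++ g.map (fun k => [k, b]) else acc))) acc]
  · rw [show (fun (acc : List (List Int)) (g : List Int) => (if b ∈ g then
      (if a ∈ g then acc ++ g.map (fun k => [k, b]) else acc) ++ g.map (fun k => [a, k])
      else (if a ∈ g then acc ++ g.map (fun k => [k, b]) else acc)))
      = (fun acc g => acc ++ ((if a ∈ g then g.map (fun k => [k, b]) else []) ++
          (if b ∈ g then g.map (fun k => [a, k]) else []))) from ?_,
      PySem.List.foldl_append_eq_flatMap]
    · rfl
    · funext acc g
      by_cases ha : a ∈ g <;> by_cases hb : b ∈ g <;> simp [ha, hb, List.append_assoc]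

-- ===== VERDICT (by name: the statement is the Claim_ definition above) =====
theorem create2_spec : Claim_equal_create2 := by
  intro res sm _ _
  unfold Spec_create2 create2 create2_alt
  rw [PySem.List.foldl_pyRange_zero_pyGetD' sm []
    (fun new_sm p =>
      (PySem.List.pyRange 0 (res.length : Int) 1).foldl (fun acc j =>
        let g := PySem.List.pyGetD res j []
        let acc := if PySem.List.pyGetD p 0 0 ∈ g then acc ++ g.map (fun k => [k, PySem.List.pyGetD p 1 0]) else acc
        if PySem.List.pyGetD p 1 0 ∈ g then acc ++ g.map (fun k => [PySem.List.pyGetD p 0 0, k]) else acc)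
        (new_sm ++ [[PySem.List.pyGetD p 0 0, PySem.List.pyGetD p 1 0]])) []]
  apply PySem.List.foldl_congr_mem
  intro acc p _
  rw [innerA_eq]
  have hidx : ∀ e : Int,
      (((PySem.List.enumerate res 0).foldl (fun idx (jg : Int × List Int) =>
        (jg.2.foldl (fun (st : PySem.Dict Int (List Int) × PySem.Set Int) x =>
            if x ∈ st.2 then st
            else (st.1.modify x [] (· ++ [jg.1]), st.2.add x)) (idx, PySem.Set.empty)).1)
        PySem.Dict.empty).getD e []) = jsOf res e 0 := by
    intro e
    rw [buildIdx_getD res 0 PySem.Dict.empty e]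
    simp
  simp only [hidx]
  have := emitMerge_eq res (PySem.List.pyGetD p 0 0) (PySem.List.pyGetD p 1 0) res 0 (by simp)
  simp only [Nat.cast_zero] at this
  rw [this, List.append_assoc]
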